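-- pv_equiv track=rewrite | github.com/BogdanB01/Stable-Matching-Application | server/smapp/upload-dir/Laborator6 (4).py | transpusa
-- ===== SOURCE A (Python) =====
-- def transpusa(matrice):
--     transpusa = []
--     n = len(matrice)
--     for i in range(0, n):
--         column = []
--         for j in range(0, n):
--             for k in range(0, len(matrice[j])):
--                 if matrice[j][k][1] == i:
--                     column.append((matrice[j][k][0], j))
--                     break
--         transpusa.append(column)
--     return transpusa
-- ===== SOURCE B (Python) =====
-- def transpusa(matrice):
--     n = len(matrice)
--     firsts = []
--     for row in matrice:
--         d = {}
--         for value, idx in row: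
--             if idx not in d:
--                 d[idx] = value
--         firsts.append(d)
--     return [[(d[i], j) for j, d in enumerate(firsts) if i in d] for i in range(n)]
-- ===== Notes on version B (the rewrite author's own statement) =====
-- stated objective: faster
-- what changed: Instead of rescanning every row for every column index i (A's triple loop with break), B builds one first-wins dict per row in a single pass over the data and then assembles each column by O(1) dict lookups.
import Mathlib
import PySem

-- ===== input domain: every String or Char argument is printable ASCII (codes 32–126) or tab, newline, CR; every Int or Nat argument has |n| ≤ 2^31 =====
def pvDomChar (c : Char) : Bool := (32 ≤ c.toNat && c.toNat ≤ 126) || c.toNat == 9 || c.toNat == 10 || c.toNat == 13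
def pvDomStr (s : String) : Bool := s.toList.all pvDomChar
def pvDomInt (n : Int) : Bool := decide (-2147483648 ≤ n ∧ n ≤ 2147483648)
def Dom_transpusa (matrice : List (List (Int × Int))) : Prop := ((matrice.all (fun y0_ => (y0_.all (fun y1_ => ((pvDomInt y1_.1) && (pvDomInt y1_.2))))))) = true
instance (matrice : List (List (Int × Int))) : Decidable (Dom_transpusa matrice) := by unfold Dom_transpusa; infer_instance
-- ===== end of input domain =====

-- B replaces A's rescan of every row for every column index by a per-row first-wins dict built once (objective: faster).

-- ===== PORT A =====
-- inner 'for k … if …: append; break' = scan the row, append the first match, stop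
def aScan (row : List (Int × Int)) (i j : Int) (column : List (Int × Int)) : List (Int × Int) :=
  match row with
  | [] => column
  | p :: rest => if p.2 == i then column ++ [(p.1, j)] else aScan rest i j column

def transpusa (matrice : List (List (Int × Int))) : List (List (Int × Int)) :=
  let n : Int := matrice.length
  (PySem.List.pyRange 0 n 1).foldl (fun acc i =>
    acc ++ [(PySem.List.pyRange 0 n 1).foldl
      (fun column j => aScan (PySem.List.pyGetD matrice j []) i j column) []]) []
  -- j always lies in range, so pyGetD's default is never used

-- ===== PORT B =====
-- 'd = {}; for value, idx in row: if idx not in d: d[idx] = value'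
def firstDict (row : List (Int × Int)) : PySem.Dict Int Int :=
  row.foldl (fun d p => if d.contains p.2 then d else d.insert p.2 p.1) PySem.Dict.empty

def transpusa_alt (matrice : List (List (Int × Int))) : List (List (Int × Int)) :=
  let n : Int := matrice.length
  let firsts := matrice.foldl (fun acc row => acc ++ [firstDict row]) []
  (PySem.List.pyRange 0 n 1).map (fun i =>
    (PySem.List.enumerate firsts 0).filterMap (fun jd =>
      if jd.2.contains i then some (jd.2.getD i 0, jd.1) else none))

-- ===== PRECONDITION & SPEC =====
def Spec_transpusa (matrice : List (List (Int × Int))) (out : List (List (Int × Int))) : Prop := out = transpusa_alt matrice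
instance (matrice : List (List (Int × Int))) (out : List (List (Int × Int))) : Decidable (Spec_transpusa matrice out) := by unfold Spec_transpusa; infer_instance

-- ===== CLAIM (what is proved, stated in full; the proofs are below) =====
def Claim_equal_transpusa : Prop := ∀ (matrice : List (List (Int × Int))), Dom_transpusa matrice → Spec_transpusa matrice (transpusa matrice)

-- ===== LEMMAS AND PROOFS =====

/-- the first value in `row` tagged with index `i` (A's break, B's first-wins dict) -/
def firstVal (row : List (Int × Int)) (i : Int) : Option Int :=
  match row with
  | [] => none
  | p :: rest => if p.2 == i then some p.1 else firstVal rest i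

theorem aScan_eq (row : List (Int × Int)) (i j : Int) (column : List (Int × Int)) :
    aScan row i j column = column ++ ((firstVal row i).map (fun v => (v, j))).toList := by
  induction row generalizing column with
  | nil => simp [aScan, firstVal]
  | cons p rest ih =>
      simp only [aScan, firstVal]
      split <;> simp [ih]

theorem firstDict_get? (row : List (Int × Int)) (i : Int) (d : PySem.Dict Int Int) :
    (row.foldl (fun d p => if d.contains p.2 then d else d.insert p.2 p.1) d).get? i =
      if (d.get? i).isSome then d.get? i else firstVal row i := by
  induction row generalizing d with
  | nil => cases h : d.get? i <;> simp [firstVal, h]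
  | cons p rest ih =>
      simp only [List.foldl_cons, firstVal]
      by_cases hc : d.contains p.2 = true
      · rw [if_pos hc, ih]
        have hs : (d.get? p.2).isSome := by
          rw [← PySem.Dict.contains_eq_isSome_get?]; exact hc
        by_cases he : (p.2 == i) = true
        · rw [Option.isSome_iff_exists] at hs
          obtain ⟨v, hv⟩ := hs
          have : i = p.2 := (beq_iff_eq.mp he).symm
          subst this
          rw [hv, if_pos (show (some v).isSome = true from rfl),
              if_pos (show (some v).isSome = true from rfl)]
        · rw [if_neg he]
      · rw [if_neg hc, ih]
        have hnone : d.get? p.2 = none := by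
          rw [← Option.not_isSome_iff_eq_none, ← PySem.Dict.contains_eq_isSome_get?]
          exact hc
        rw [PySem.Dict.get?_insert]
        by_cases he : i = p.2
        · subst he
          rw [if_pos rfl, if_pos (show (some p.1).isSome = true from rfl), hnone,
              if_neg (show ¬ (none : Option Int).isSome = true from by decide),
              if_pos (show (p.2 == p.2) = true from beq_self_eq_true p.2)]
        · have he' : ¬ (p.2 == i) = true := fun h => he (beq_iff_eq.mp h).symm
          rw [if_neg he, if_neg he']

theorem flatMap_toList_eq_filterMap {α β : Type} (l : List α) (o : α → Option β) :
    l.flatMap (fun x => (o x).toList) = l.filterMap o := by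
  induction l with
  | nil => rfl
  | cons x xs ih => cases h : o x <;> simp [List.flatMap_cons, h, ih]

theorem flatMap_congr_mem {α β : Type} (l : List α) (f g : α → List β)
    (h : ∀ x ∈ l, f x = g x) : l.flatMap f = l.flatMap g := by
  induction l with
  | nil => rfl
  | cons x xs ih =>
      simp only [List.flatMap_cons]
      rw [h x (List.mem_cons_self), ih (fun y hy => h y (List.mem_cons_of_mem x hy))]

theorem transpusa_spec' (matrice : List (List (Int × Int))) :
    transpusa matrice = transpusa_alt matrice := by
  simp only [transpusa, transpusa_alt]
  rw [PySem.List.foldl_append_singleton_eq_map, List.nil_append,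
      PySem.List.foldl_append_singleton_eq_map, List.nil_append]
  simp only [PySem.List.enumerate_eq_map_pyRange (d := PySem.Dict.empty)]
  apply List.map_congr_left
  intro i _
  -- left column: fold of appends = flatMap of option singletons
  have hL : ∀ (acc : List (Int × Int)),
      (PySem.List.pyRange 0 (matrice.length) 1).foldl
        (fun column j => aScan (PySem.List.pyGetD matrice j []) i j column) acc =
      acc ++ (PySem.List.pyRange 0 (matrice.length) 1).flatMap
        (fun j => ((firstVal (PySem.List.pyGetD matrice j []) i).map (fun v => (v, j))).toList) := by
    intro acc
    have := PySem.List.foldl_append_eq_flatMap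
      (g := fun j => ((firstVal (PySem.List.pyGetD matrice j []) i).map (fun v => (v, j))).toList)
      (l := PySem.List.pyRange 0 (matrice.length) 1) (acc := acc)
    rw [← this]
    apply PySem.List.foldl_congr_mem
    intro acc x _; exact aScan_eq _ _ _ _
  rw [hL, List.nil_append]
  -- right column: filterMap over the mapped range
  simp only [PySem.List.len_eq, List.length_map]
  rw [List.filterMap_map, ← flatMap_toList_eq_filterMap]
  apply flatMap_congr_mem
  intro j hj
  have hj' := (PySem.List.mem_pyRange_one).mp hj
  -- the dict for row j
  have h0 : 0 ≤ j := hj'.1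
  have h1 : j < (matrice.length : Int) := hj'.2
  have hmap : PySem.List.pyGetD
      (matrice.map (fun row => firstDict row)) j PySem.Dict.empty
      = firstDict (PySem.List.pyGetD matrice j []) := by
    rw [PySem.List.pyGetD_eq_getElem _ _ h0 (by simpa using h1),
        PySem.List.pyGetD_eq_getElem _ _ h0 h1, List.getElem_map]
  simp only [Function.comp]
  rw [hmap]
  have hget : (firstDict (PySem.List.pyGetD matrice j [])).get? i
      = firstVal (PySem.List.pyGetD matrice j []) i := by
    rw [firstDict, firstDict_get?]
    simp [PySem.Dict.get?_empty]
  have hcont : (firstDict (PySem.List.pyGetD matrice j [])).contains i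
      = (firstVal (PySem.List.pyGetD matrice j []) i).isSome := by
    rw [PySem.Dict.contains_eq_isSome_get?, hget]
  cases h : firstVal (PySem.List.pyGetD matrice j []) i with
  | none => simp [hcont, h]
  | some v =>
      simp only [hcont, h, Option.isSome_some, if_true]
      rw [PySem.Dict.getD_eq_get?_getD, hget, h]
      simp

-- ===== VERDICT (by name: the statement is the Claim_ definition above) =====
theorem transpusa_spec : Claim_equal_transpusa := by
  intro m _
  exact transpusa_spec' m
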